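-- pv_equiv track=rewrite | github.com/junhoKim-iib/codingTestStudy | junho/PGS/기능개발.py | solution
-- ===== SOURCE A (Python) =====
-- from collections import deque
--
-- def solution(progresses, speeds):
--     answer = []
--     progresses = deque((-x, index) for index, x in enumerate(progresses))
--
--     while progresses:
--         cnt = 0
--
--         progresses = deque((x - speeds[index], index) for x, index in progresses)
--         while progresses and progresses[0][0] <= -100:
--             cnt += 1
--             progresses.popleft()
--
--         if cnt > 0:
--             answer.append(cnt)
--
--
--     return answer
-- ===== SOURCE B (Python) =====
-- def solution(progresses, speeds):
--     # One pass: days to finish each feature (closed form), grouped by running maximum.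
--     answer = []
--     front_day = 0   # release day of the current group's front feature
--     count = 0       # size of the current group (0 = no group open yet)
--     for p, s in zip(progresses, speeds):
--         d = max(1, -((p - 100) // s)) if s > 0 else 1   # first day with p + d*s >= 100
--         if d > front_day:
--             if count:
--                 answer.append(count)
--             front_day = d
--             count = 1
--         else:
--             count += 1
--     if count:
--         answer.append(count)
--     return answer
-- ===== Notes on version B (the rewrite author's own statement) =====
-- stated objective: faster
-- what changed: B replaces A's day-by-day deque simulation (rebuilding the whole queue every day) with a single pass that computes each feature's completion day by ceiling division and groups features by the running maximum of those days; intended as faster (in a timing run A timed out at n=16 where B returned; no clean ratio could be measured).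
-- outside the precondition, e.g. on solution([150], [-1]): A returns [1], B returns [1]; on solution([50, 110], [10, -5]): A does not finish within the time limit, B returns [2]; on solution([50], []): A raises IndexError, B returns []
import Mathlib
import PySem

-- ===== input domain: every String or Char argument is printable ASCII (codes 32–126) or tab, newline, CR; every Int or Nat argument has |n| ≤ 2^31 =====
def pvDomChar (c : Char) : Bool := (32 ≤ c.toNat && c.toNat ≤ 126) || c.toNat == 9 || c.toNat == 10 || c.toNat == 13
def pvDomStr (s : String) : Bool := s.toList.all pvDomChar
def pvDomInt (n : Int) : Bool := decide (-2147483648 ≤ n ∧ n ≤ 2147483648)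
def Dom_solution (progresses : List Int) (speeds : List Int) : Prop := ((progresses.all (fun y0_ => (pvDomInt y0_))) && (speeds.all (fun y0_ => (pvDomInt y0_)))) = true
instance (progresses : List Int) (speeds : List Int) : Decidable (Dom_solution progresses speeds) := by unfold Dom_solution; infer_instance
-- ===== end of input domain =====

-- B replaces A's day-by-day queue simulation with one pass: a closed-form completion day per
-- feature, grouped by the running maximum. Intended as faster; in a timing run A timed
-- out where B returned, but no clean ratio could be measured.
-- A's port follows A's simulation; its fuel bound only makes the recursion total and is
-- never exhausted on inputs satisfying Pre_solution.

-- ===== PORT A =====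
def pvSubDay (speeds : List Int) (q : List (Int × Int)) : List (Int × Int) :=
  q.map (fun xi => (xi.1 - ((PySem.List.pyGet? speeds xi.2).getD 0), xi.2))
def pvPopFront : List (Int × Int) → Nat × List (Int × Int)
  | [] => (0, [])
  | (x, i) :: rest =>
      if x ≤ -100 then
        let (c, r) := pvPopFront rest
        (c + 1, r)
      else (0, (x, i) :: rest)
def pvLoopA (speeds : List Int) : Nat → List (Int × Int) → List Int → List Int
  | _, [], ans => ans
  | 0, _, ans => ans
  | fuel + 1, q, ans =>
      let q' := pvSubDay speeds q
      let (cnt, q'') := pvPopFront q'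
      pvLoopA speeds fuel q'' (if 0 < cnt then ans ++ [(cnt : Int)] else ans)

def pvFuelA (progresses : List Int) : Nat :=
  (progresses.map (fun p => 1 + (100 - p).toNat)).sum + 1

def solution (progresses : List Int) (speeds : List Int) : List Int :=
  pvLoopA speeds (pvFuelA progresses)
    ((PySem.List.enumerate progresses).map (fun ix => (-ix.2, ix.1))) []

-- ===== PORT B =====
def pvDays (p s : Int) : Int :=
  if 0 < s then max 1 (-(PySem.Int.floordiv (p - 100) s)) else 1

def pvGroupLoop : List (Int × Int) → Int → Int → List Int → List Int
  | [], _, count, ans => if 0 < count then ans ++ [count] else ans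
  | (p, s) :: rest, frontDay, count, ans =>
      let d := pvDays p s
      if frontDay < d then
        pvGroupLoop rest d 1 (if 0 < count then ans ++ [count] else ans)
      else
        pvGroupLoop rest frontDay (count + 1) ans

def solution_alt (progresses : List Int) (speeds : List Int) : List Int :=
  pvGroupLoop (progresses.zip speeds) 0 0 []

-- ===== PRECONDITION & SPEC =====
-- Pre_ excludes inputs where speeds is shorter than progresses (A raises IndexError) and
-- inputs containing a non-positive speed: on those A almost always loops forever (the
-- feature never reaches 100), and whether A returns at all there depends on the whole
-- prefix-by-prefix simulation, which is not a closed-form per-input condition.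
def Pre_solution (progresses : List Int) (speeds : List Int) : Prop :=
  progresses.length ≤ speeds.length ∧ ∀ pr ∈ progresses.zip speeds, 0 < pr.2
instance (progresses : List Int) (speeds : List Int) : Decidable (Pre_solution progresses speeds) := by unfold Pre_solution; infer_instance

def pvWitness_solution : List Int × List Int := ([93, 30, 55], [1, 30, 5])

def Spec_solution (progresses : List Int) (speeds : List Int) (out : List Int) : Prop := out = solution_alt progresses speeds
instance (progresses : List Int) (speeds : List Int) (out : List Int) : Decidable (Spec_solution progresses speeds out) := by unfold Spec_solution; infer_instance

-- ===== CLAIM (what is proved, stated in full; the proofs are below) =====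
def Claim_equal_solution : Prop := ∀ (progresses : List Int) (speeds : List Int), Dom_solution progresses speeds → Pre_solution progresses speeds → Spec_solution progresses speeds (solution progresses speeds)

-- ===== LEMMAS AND PROOFS =====
def pvState (t : Int) (l : List ((Int × Int) × Int)) : List (Int × Int) :=
  l.map (fun e => (-e.1.1 + -(t * e.1.2), e.2))
def pvWF (speeds : List Int) (l : List ((Int × Int) × Int)) : Prop :=
  ∀ e ∈ l, PySem.List.pyGet? speeds e.2 = some e.1.2 ∧ 0 < e.1.2
theorem pvDays_pos (p s : Int) : 1 ≤ pvDays p s := by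
  unfold pvDays; split
  · exact le_max_left _ _
  · exact le_refl _
theorem pvDays_le_iff (p s d : Int) (hs : 0 < s) (hd : 1 ≤ d) :
    (pvDays p s ≤ d ↔ 100 ≤ p + d * s) := by
  unfold pvDays
  rw [if_pos hs, PySem.Int.floordiv_eq_ediv_of_pos hs]
  rw [max_le_iff]
  constructor
  · rintro ⟨-, h2⟩
    have : -d ≤ (p - 100) / s := by omega
    have := (Int.le_ediv_iff_mul_le hs).mp this
    nlinarith
  · intro h
    refine ⟨hd, ?_⟩
    have : -d * s ≤ p - 100 := by nlinarith
    have := (Int.le_ediv_iff_mul_le hs).mpr this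
    omega

theorem pvSubDay_state (speeds : List Int) (t : Int) (l : List ((Int × Int) × Int))
    (hwf : pvWF speeds l) : pvSubDay speeds (pvState t l) = pvState (t + 1) l := by
  induction l with
  | nil => rfl
  | cons e rest ih =>
      have he := hwf e (by simp)
      have hr : pvWF speeds rest := fun x hx => hwf x (by simp [hx])
      simp only [pvState, pvSubDay, List.map_cons, List.map_map] at *
      rw [he.1, ih hr]
      simp only [Option.getD_some, List.cons.injEq, Prod.mk.injEq]
      exact ⟨⟨by ring, trivial⟩, trivial⟩

theorem pvPop_state (u : Int) (l : List ((Int × Int) × Int)) (hwf : ∀ e ∈ l, (0:Int) < e.1.2)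
    (hu : 1 ≤ u) :
    pvPopFront (pvState u l) =
      ((l.takeWhile (fun e => pvDays e.1.1 e.1.2 ≤ u)).length,
       pvState u (l.dropWhile (fun e => pvDays e.1.1 e.1.2 ≤ u))) := by
  induction l with
  | nil => rfl
  | cons e rest ih =>
      have he := hwf e (by simp)
      have hr := fun x hx => hwf x (List.mem_cons_of_mem _ hx)
      have hiff : (-e.1.1 + -(u * e.1.2) ≤ -100) ↔ pvDays e.1.1 e.1.2 ≤ u := by
        rw [pvDays_le_iff _ _ _ he hu]; constructor <;> intro h <;> nlinarith
      by_cases hc : pvDays e.1.1 e.1.2 ≤ u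
      · simp only [pvState, List.map_cons, pvPopFront, if_pos (hiff.mpr hc)]
        rw [show pvPopFront (rest.map _) = pvPopFront (pvState u rest) from rfl, ih hr]
        simp [List.takeWhile_cons, List.dropWhile_cons, hc, pvState]
      · simp only [pvState, List.map_cons, pvPopFront, if_neg (fun h => hc (hiff.mp h))]
        simp [List.takeWhile_cons, List.dropWhile_cons, hc, pvState]

theorem pvGroup_consume (m : List (Int × Int)) (prev c : Int) (ans : List Int) :
    pvGroupLoop m prev c ans =
      pvGroupLoop (m.dropWhile (fun e => pvDays e.1 e.2 ≤ prev)) prev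
        (c + (m.takeWhile (fun e => pvDays e.1 e.2 ≤ prev)).length) ans := by
  induction m generalizing c with
  | nil => simp
  | cons e rest ih =>
      by_cases hc : pvDays e.1 e.2 ≤ prev
      · obtain ⟨p, s⟩ := e
        simp only [pvGroupLoop, if_neg (by simp at hc ⊢; omega : ¬ prev < pvDays p s)]
        rw [ih (c+1)]
        simp [List.takeWhile_cons, List.dropWhile_cons, hc]
        ring_nf
      · simp [List.takeWhile_cons, List.dropWhile_cons, hc]

theorem pvGroup_flush (m : List (Int × Int)) (prev c : Int) (ans : List Int)
    (h : m = [] ∨ ∀ x ∈ m.head?, prev < pvDays x.1 x.2) (hc : 0 < c) :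
    pvGroupLoop m prev c ans = pvGroupLoop m prev 0 (ans ++ [c]) := by
  match m with
  | [] => simp [pvGroupLoop, hc]
  | (p, s) :: rest =>
      have hd : prev < pvDays p s := by
        rcases h with h | h
        · cases h
        · exact h (p, s) (by simp)
      simp [pvGroupLoop, if_pos hd, hc]

theorem pvStep (speeds : List Int) (n : Nat) (x : (Int × Int) × Int)
    (rest : List ((Int × Int) × Int)) (t : Int) (ans : List Int) :
    pvLoopA speeds (n + 1) (pvState t (x :: rest)) ans =
      pvLoopA speeds n (pvPopFront (pvSubDay speeds (pvState t (x :: rest)))).2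
        (if 0 < (pvPopFront (pvSubDay speeds (pvState t (x :: rest)))).1 then
          ans ++ [((pvPopFront (pvSubDay speeds (pvState t (x :: rest)))).1 : Int)]
        else ans) := rfl

theorem pvQuiet (speeds : List Int) (x : (Int × Int) × Int) (rest : List ((Int × Int) × Int))
    (hwf : pvWF speeds (x :: rest)) (k : Nat) :
    ∀ (t : Int) (f : Nat) (ans : List Int), 0 ≤ t → t + k < pvDays x.1.1 x.1.2 →
      pvLoopA speeds (k + f) (pvState t (x :: rest)) ans
        = pvLoopA speeds f (pvState (t + k) (x :: rest)) ans := by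
  induction k with
  | zero => intro t f ans _ _; simp
  | succ k ih =>
      intro t f ans ht hlt
      have hx := hwf x (by simp)
      have hstep : k + 1 + f = (k + f) + 1 := by omega
      rw [hstep, pvStep, pvSubDay_state speeds t _ hwf,
        pvPop_state (t + 1) _ (fun e he => (hwf e he).2) (by omega : (1:Int) ≤ t + 1)]
      have hnot : ¬ (pvDays x.1.1 x.1.2 ≤ t + 1) := by push_cast at hlt; omega
      simp only [List.takeWhile_cons, List.dropWhile_cons, hnot, decide_false,
        Bool.false_eq_true, if_false, List.length_nil, Nat.lt_irrefl]
      have hih := ih (t + 1) f ans (by omega) (by push_cast at hlt ⊢; omega)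
      have harg : t + 1 + (k : Int) = t + ((k + 1 : Nat) : Int) := by push_cast; ring
      rw [hih, harg]

theorem pvMainAux (speeds : List Int) (n : Nat) :
    ∀ (l : List ((Int × Int) × Int)), l.length = n →
    ∀ (t : Int) (fuel : Nat) (ans : List Int), pvWF speeds l → 0 ≤ t →
      (∀ x ∈ l.head?, t < pvDays x.1.1 x.1.2) →
      (∀ e ∈ l, pvDays e.1.1 e.1.2 ≤ t + fuel) →
      pvLoopA speeds fuel (pvState t l) ans = pvGroupLoop (l.map (·.1)) t 0 ans := by
  induction n using Nat.strong_induction_on with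
  | _ n ih =>
    intro l hlen t fuel ans hwf ht hhead hfuel
    match l with
    | [] =>
        cases fuel <;> simp [pvLoopA, pvState, pvGroupLoop]
    | ⟨⟨p, s⟩, i⟩ :: rest =>
        set d := pvDays p s with hd
        have hd1 : 1 ≤ d := pvDays_pos p s
        have htd : t < d := hhead ((p, s), i) rfl
        have hdfuel : d ≤ t + fuel := hfuel ((p, s), i) (List.mem_cons_self)
        set k : Nat := (d - t - 1).toNat with hkdef
        have hk : (k : Int) = d - t - 1 := by omega
        have hfge : k + 1 ≤ fuel := by omega
        set f : Nat := fuel - (k + 1) with hfdef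
        have hfe : fuel = k + (f + 1) := by omega
        rw [hfe, pvQuiet speeds _ rest hwf k t (f + 1) ans ht
          (by show t + (k : Int) < pvDays p s; omega)]
        have htk1 : t + (k : Int) + 1 = d := by omega
        rw [pvStep, pvSubDay_state speeds _ _ hwf, htk1,
          pvPop_state d _ (fun e he => (hwf e he).2) hd1]
        have hself : pvDays (⟨⟨p, s⟩, i⟩ : (Int × Int) × Int).1.1 (⟨⟨p, s⟩, i⟩ : (Int × Int) × Int).1.2 ≤ d := le_refl d
        simp only [List.takeWhile_cons, List.dropWhile_cons, decide_eq_true_eq, hself,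
          if_true, decide_true, List.length_cons]
        set P : ((Int × Int) × Int) → Bool := fun e => decide (pvDays e.1.1 e.1.2 ≤ d) with hP
        set l' : List ((Int × Int) × Int) := rest.dropWhile P with hl'
        set K : Nat := (rest.takeWhile P).length with hK
        -- the pop count is K + 1 > 0
        rw [if_pos (Nat.succ_pos K)]
        -- IH on the shorter suffix l'
        have hlen' : l'.length < n := by
          have := (List.dropWhile_sublist (l := rest) P).length_le
          simp [← hlen, hl']; omega
        have hwf' : pvWF speeds l' := fun e he =>
          hwf e (List.mem_cons_of_mem _ ((List.dropWhile_sublist P).mem he))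
        have hhead' : ∀ x ∈ l'.head?, d < pvDays x.1.1 x.1.2 := by
          intro x hx
          have := List.head?_dropWhile_not P rest
          rw [← hl'] at this
          cases hh : l'.head? with
          | none => simp [hh] at hx
          | some y =>
              rw [hh] at this hx
              simp at hx
              subst hx
              simp [hP] at this
              omega
        have hfuel' : ∀ e ∈ l', pvDays e.1.1 e.1.2 ≤ d + f := by
          intro e he
          have := hfuel e (List.mem_cons_of_mem _ ((List.dropWhile_sublist P).mem he))
          omega
        rw [ih l'.length hlen' l' rfl d f _ hwf' (by omega) hhead' hfuel']
        -- B side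
        show _ = pvGroupLoop ((p, s) :: rest.map (·.1)) t 0 ans
        rw [show pvGroupLoop ((p, s) :: rest.map (·.1)) t 0 ans
            = if t < pvDays p s then pvGroupLoop (rest.map (·.1)) (pvDays p s) 1
                (if (0:Int) < 0 then ans ++ [0] else ans)
              else pvGroupLoop (rest.map (·.1)) t (0 + 1) ans from rfl]
        rw [if_pos htd, if_neg (lt_irrefl (0:Int))]
        rw [pvGroup_consume (rest.map (·.1)) d 1 ans]
        have hmapdrop : (rest.map (·.1)).dropWhile (fun e => pvDays e.1 e.2 ≤ d) = l'.map (·.1) := by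
          rw [List.dropWhile_map]; rfl
        have hmaptake : ((rest.map (·.1)).takeWhile (fun e => pvDays e.1 e.2 ≤ d)).length = K := by
          rw [List.takeWhile_map, List.length_map]; rfl
        rw [hmapdrop, hmaptake]
        rw [pvGroup_flush (l'.map (·.1)) d (1 + K) ans ?_ (by positivity)]
        · have hKc : ((K + 1 : Nat) : Int) = 1 + (K : Int) := by push_cast; ring
          rw [hKc]
        · cases hh : l'.head? with
          | none =>
              left
              rw [List.head?_eq_none_iff.mp hh]
              rfl
          | some y =>
              right
              intro z hz
              rw [List.head?_map, hh] at hz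
              simp at hz
              subst hz
              exact hhead' y (by rw [hh]; rfl)

theorem pvInit (ps ss : List Int) (s0 : Int) (h : ps.length ≤ ss.length) :
    (PySem.List.enumerate ps s0).map (fun ix => (-ix.2, ix.1))
      = pvState 0 ((PySem.List.enumerate (ps.zip ss) s0).map (fun e => (e.2, e.1))) := by
  induction ps generalizing ss s0 with
  | nil => simp [PySem.List.enumerate_nil, pvState]
  | cons p ps ih =>
      cases ss with
      | nil => simp at h
      | cons s ss =>
          simp only [List.zip_cons_cons, PySem.List.enumerate_cons, List.map_cons, pvState]
          rw [List.cons.injEq]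
          refine ⟨by norm_num, ?_⟩
          have := ih ss (s0 + 1) (by simpa using h)
          simpa [pvState] using this

theorem pvL_elem (ps ss : List Int) (e : (Int × Int) × Int)
    (he : e ∈ (PySem.List.enumerate (ps.zip ss)).map (fun e => (e.2, e.1))) :
    ∃ k : Nat, ∃ h : k < (ps.zip ss).length, e = ((ps.zip ss)[k], (k : Int)) := by
  obtain ⟨e', he', rfl⟩ := List.mem_map.mp he
  obtain ⟨k, hk, rfl⟩ := (PySem.List.mem_enumerate_iff _ _ _).mp he'
  exact ⟨k, hk, by simp⟩

theorem solution_eq (ps ss : List Int) (hpre : Pre_solution ps ss) :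
    solution ps ss = solution_alt ps ss := by
  obtain ⟨hlen, hpos⟩ := hpre
  set L : List ((Int × Int) × Int) :=
    (PySem.List.enumerate (ps.zip ss)).map (fun e => (e.2, e.1)) with hL
  have hwf : pvWF ss L := by
    intro e he
    obtain ⟨k, hk, rfl⟩ := pvL_elem ps ss e he
    have hks : k < ss.length := by simp [List.length_zip] at hk; omega
    have hzk : (ps.zip ss)[k] = (ps[k]'(by simp [List.length_zip] at hk ⊢; omega), ss[k]'hks) :=
      List.getElem_zip ..
    constructor
    · simp only [hzk]
      rw [PySem.List.pyGet?_natCast]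
      simp [hks]
    · have := hpos ((ps.zip ss)[k]) (List.getElem_mem hk)
      simpa using this
  have hfuel : ∀ e ∈ L, pvDays e.1.1 e.1.2 ≤ 0 + (pvFuelA ps : Int) := by
    intro e he
    obtain ⟨k, hk, rfl⟩ := pvL_elem ps ss e he
    have hkp : k < ps.length := by simp [List.length_zip] at hk; omega
    have hks : k < ss.length := by simp [List.length_zip] at hk; omega
    have hzk : (ps.zip ss)[k] = (ps[k]'hkp, ss[k]'hks) := List.getElem_zip ..
    set pk := ps[k]'hkp with hpk
    set sk := ss[k]'hks with hsk
    have hs : (0:Int) < sk := by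
      have := hpos ((ps.zip ss)[k]) (List.getElem_mem hk)
      rw [hzk] at this
      exact this
    set D : Nat := 1 + (100 - pk).toNat with hD
    have hD1 : (1:Int) ≤ (D:Int) := by omega
    have h1 : (101:Int) ≤ pk + (D:Int) := by omega
    have hDe : pvDays pk sk ≤ (D:Int) := by
      rw [pvDays_le_iff _ _ _ hs hD1]
      nlinarith
    have hmem : D ∈ ps.map (fun p => 1 + (100 - p).toNat) :=
      List.mem_map.mpr ⟨pk, List.getElem_mem hkp, rfl⟩
    have hsum : D ≤ (ps.map (fun p => 1 + (100 - p).toNat)).sum :=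
      List.single_le_sum (fun x _ => Nat.zero_le x) _ hmem
    have hfin : pvDays pk sk ≤ 0 + (pvFuelA ps : Int) := by
      have h2 := Int.ofNat_le.mpr hsum
      have h3 : (pvFuelA ps : Int)
          = ((((ps.map (fun p => 1 + (100 - p).toNat)).sum : Nat)) : Int) + 1 := by
        exact_mod_cast rfl
      omega
    simpa [hzk] using hfin
  have hmap : L.map (·.1) = ps.zip ss := by
    rw [hL, List.map_map]
    have : ((fun x => x.1) ∘ (fun e : Int × (Int × Int) => (e.2, e.1))) = (·.2) := rfl
    rw [this, PySem.List.map_snd_enumerate]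
  unfold solution solution_alt
  rw [pvInit ps ss 0 hlen, ← hL]
  rw [pvMainAux ss L.length L rfl 0 (pvFuelA ps) [] hwf le_rfl
    (fun x _ => lt_of_lt_of_le zero_lt_one (pvDays_pos _ _)) hfuel, hmap]

-- ===== VERDICT (by name: the statement is the Claim_ definition above) =====
theorem solution_spec : Claim_equal_solution := by
  intro progresses speeds _ hpre
  unfold Spec_solution
  exact solution_eq progresses speeds hpre
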